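-- pv_equiv track=rewrite | github.com/OSGeo/libgeotiff | libgeotiff/csv/csv_tools.py | escape_field
-- ===== SOURCE A (Python) =====
-- import string
--
-- def escape_field( in_text ):
--     safe_chars = string.ascii_letters + string.digits + '.- '
--
--     out_field = ''
--     need_quotes = 0
--     for c in in_text:
--         if c not in safe_chars:
--             need_quotes = 1
--
--         if c == '"':
--             # add extra quote for quotes.
--             out_field = out_field + '"'
--             need_quotes = 1
--
--         out_field = out_field + c
--
--     if need_quotes:
--         out_field = '"' + out_field + '"'
--
--     return out_field
-- ===== SOURCE B (Python) =====
-- import string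
--
-- _SAFE = frozenset(string.ascii_letters + string.digits + '.- ')
--
--
-- def escape_field(in_text):
--     body = '""'.join(in_text.split('"'))
--     if set(in_text) - _SAFE:
--         return '"' + body + '"'
--     return body
-- ===== Notes on version B (the rewrite author's own statement) =====
-- stated objective: faster
-- what changed: Replaces A's fused per-character loop with a growing string and need_quotes flag by whole-string operations: quote doubling via splitting on the quote character and rejoining with a doubled quote, and the quoting decision via a set difference against the safe set being nonempty.
import Mathlib
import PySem

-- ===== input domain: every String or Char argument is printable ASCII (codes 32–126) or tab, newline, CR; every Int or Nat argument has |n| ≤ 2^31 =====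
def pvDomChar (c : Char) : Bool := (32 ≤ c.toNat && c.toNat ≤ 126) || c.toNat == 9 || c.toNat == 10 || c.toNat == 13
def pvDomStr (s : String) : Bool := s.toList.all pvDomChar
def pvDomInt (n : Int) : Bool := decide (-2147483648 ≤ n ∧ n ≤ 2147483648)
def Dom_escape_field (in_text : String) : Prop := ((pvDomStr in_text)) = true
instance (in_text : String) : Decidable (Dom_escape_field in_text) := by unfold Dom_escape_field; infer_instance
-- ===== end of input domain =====

-- B replaces A's fused per-character loop (accumulator string + need_quotes flag) with
-- whole-string operations: split on '"' rejoined with '""', and a set difference against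
-- the safe set to decide quoting; same return value, proved equal.

-- ===== PORT A =====
-- safe_chars = string.ascii_letters + string.digits + '.- '
def safeCharsA : List Char :=
  "abcdefghijklmnopqrstuvwxyzABCDEFGHIJKLMNOPQRSTUVWXYZ0123456789.- ".toList

-- one iteration of A's for-loop over (out_field, need_quotes)
def stepA (s : List Char × Bool) (c : Char) : List Char × Bool :=
  let nq := if !(safeCharsA.contains c) then true else s.2
  if c == '"' then (s.1 ++ ['"'] ++ [c], true)
  else (s.1 ++ [c], nq)

def escape_field (in_text : String) : String :=
  let st := in_text.toList.foldl stepA ([], false)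
  if st.2 then String.ofList ('"' :: st.1 ++ ['"']) else String.ofList st.1

-- ===== PORT B =====
-- _SAFE = frozenset(string.ascii_letters + string.digits + '.- ')
def pvSafeB : PySem.Set Char := PySem.Set.ofList
  "abcdefghijklmnopqrstuvwxyzABCDEFGHIJKLMNOPQRSTUVWXYZ0123456789.- ".toList

def escape_field_alt (in_text : String) : String :=
  -- body = '""'.join(in_text.split('"'))
  let body := String.ofList
    (PySem.Chars.join ['"', '"'] (PySem.Chars.splitOn in_text.toList ['"']))
  -- if set(in_text) - _SAFE:  (truthy = nonempty)
  if PySem.Set.diff (PySem.Set.ofList in_text.toList) pvSafeB = [] then body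
  else "\"" ++ body ++ "\""

-- ===== PRECONDITION & SPEC =====
def Spec_escape_field (in_text : String) (out : String) : Prop := out = escape_field_alt in_text
instance (in_text : String) (out : String) : Decidable (Spec_escape_field in_text out) := by unfold Spec_escape_field; infer_instance

-- ===== CLAIM (what is proved, stated in full; the proofs are below) =====
def Claim_equal_escape_field : Prop := ∀ (in_text : String), Dom_escape_field in_text → Spec_escape_field in_text (escape_field in_text)

-- ===== LEMMAS AND PROOFS =====

-- the doubling of quotes, as a flatMap (reference form both sides are reduced to)
def dbl (l : List Char) : List Char :=
  l.flatMap (fun c => if c == '"' then ['"', '"'] else [c])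

-- A's fold computes (doubled text, any-unsafe flag)
theorem escape_fold (l : List Char) (acc : List Char) (b : Bool) :
    l.foldl stepA (acc, b)
    = (acc ++ dbl l, b || l.any (fun c => !(safeCharsA.contains c))) := by
  induction l generalizing acc b with
  | nil => simp [dbl]
  | cons c t ih =>
    simp only [List.foldl_cons, dbl, List.flatMap_cons]
    by_cases hq : c = '"'
    · subst hq
      have hs : stepA (acc, b) '"' = (acc ++ ['"', '"'], true) := by
        simp [stepA]
      rw [hs, ih]
      have hns : ('"' ∈ safeCharsA) = False := by decide
      simp [dbl, hns]
    · have hc : (c == '"') = false := by simpa using hq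
      have hs : stepA (acc, b) c = (acc ++ [c], if !(safeCharsA.contains c) then true else b) := by
        simp [stepA, hc]
      rw [hs, ih]
      cases hcs : (c ∈ safeCharsA : Bool) <;>
        simp [dbl, hcs, hc]

-- reference single-quote splitter (reverse-accumulator, as splitOn.go with sep = ['"'])
def sSplit : List Char → List Char → List (List Char)
  | [], cur => [cur.reverse]
  | c :: rest, cur =>
      if c == '"' then cur.reverse :: sSplit rest []
      else sSplit rest (c :: cur)

theorem sSplit_ne_nil (l cur : List Char) : sSplit l cur ≠ [] := by
  induction l generalizing cur with
  | nil => simp [sSplit]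
  | cons c t ih => by_cases h : c = '"' <;> simp [sSplit, h, ih]

theorem go_eq_sSplit (fuel : Nat) (l cur : List Char) (acc : List (List Char))
    (h : l.length ≤ fuel) :
    PySem.Chars.splitOn.go ['"'] fuel l cur acc = acc.reverse ++ sSplit l cur := by
  induction fuel generalizing l cur acc with
  | zero =>
    have : l = [] := by
      cases l with
      | nil => rfl
      | cons c t => simp at h
    subst this
    simp [PySem.Chars.splitOn.go, sSplit]
  | succ n ih =>
    cases l with
    | nil => simp [PySem.Chars.splitOn.go, sSplit]
    | cons c t =>
      by_cases hq : c = '"'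
      · subst hq
        have hpre : List.isPrefixOf ['"'] ('"' :: t) = true := by simp [List.isPrefixOf]
        rw [PySem.Chars.splitOn.go, if_pos hpre]
        simp only [List.length_cons] at h
        simp only [List.length_singleton, List.drop_succ_cons, List.drop_zero]
        rw [ih t [] (cur.reverse :: acc) (by omega)]
        simp [sSplit]
      · have hpre : List.isPrefixOf ['"'] (c :: t) = false := by
          simp [List.isPrefixOf]; exact fun h => absurd h.symm hq
        rw [PySem.Chars.splitOn.go, if_neg (by simp [hpre])]
        simp only [List.length_cons] at h
        rw [ih t (c :: cur) acc (by omega)]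
        simp [sSplit, hq]

-- joining the split with '""' doubles the quotes
theorem intercalate_cons2 (sep a b : List Char) (l : List (List Char)) :
    List.intercalate sep (a :: b :: l) = a ++ sep ++ List.intercalate sep (b :: l) := by
  simp [List.intercalate, List.intersperse]

theorem join_sSplit (l cur : List Char) :
    List.intercalate ['"', '"'] (sSplit l cur) = cur.reverse ++ dbl l := by
  induction l generalizing cur with
  | nil => simp [sSplit, dbl, List.intercalate]
  | cons c t ih =>
    by_cases hq : c = '"'
    · subst hq
      rw [sSplit]
      simp only [beq_self_eq_true, if_true]
      cases hs : sSplit t [] with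
      | nil => exact absurd hs (sSplit_ne_nil t [])
      | cons b l' =>
        rw [intercalate_cons2, ← hs, ih []]
        simp [dbl]
    · have hc : (c == '"') = false := by simpa using hq
      rw [sSplit, if_neg (by simp [hc]), ih (c :: cur)]
      simp [dbl, hq]

set_option maxRecDepth 4000 in
theorem pvSafe_eq : pvSafeB = safeCharsA := by decide

theorem safe_mem (c : Char) :
    PySem.Set.contains pvSafeB c = safeCharsA.contains c := by
  rw [PySem.Set.contains, pvSafe_eq]

-- the set-difference test is the any-unsafe test
set_option maxRecDepth 4000 in
theorem diff_empty_iff (l : List Char) :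
    (PySem.Set.diff (PySem.Set.ofList l) pvSafeB = []) ↔
      (l.any (fun c => !(safeCharsA.contains c)) = false) := by
  rw [PySem.Set.diff, List.filter_eq_nil_iff, List.any_eq_false]
  constructor
  · intro h c hc
    have := h c ((PySem.Set.mem_ofList l c).mpr hc)
    simpa [safe_mem] using this
  · intro h c hc
    have := h c ((PySem.Set.mem_ofList l c).mp hc)
    simpa [safe_mem] using this

-- ===== VERDICT (by name: the statement is the Claim_ definition above) =====
theorem escape_field_spec : Claim_equal_escape_field := by
  intro s _
  show escape_field s = escape_field_alt s
  unfold escape_field escape_field_alt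
  rw [escape_fold]
  rw [PySem.Chars.splitOn, go_eq_sSplit _ _ _ _ (by omega), PySem.Chars.join]
  simp only [List.reverse_nil, List.nil_append, Bool.false_or, join_sSplit]
  cases h : s.toList.any (fun c => !(safeCharsA.contains c)) with
  | false =>
    rw [if_neg (by simp), if_pos ((diff_empty_iff _).mpr h)]
  | true =>
    rw [if_pos rfl, if_neg (fun he => absurd ((diff_empty_iff _).mp he) (by rw [h]; simp))]
    apply String.ext
    simp
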